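-- pv_equiv track=rewrite | github.com/TomKite57/advent_of_code_2017 | headers/day21.py | sections_to_line
-- ===== SOURCE A (Python) =====
-- def sections_to_line(sections_arr):
--     rval = ""
--     slash_count = sections_arr[0][0].count('/') + 1
--     for row in sections_arr:
--         for i in range(slash_count):
--             temp = ''
--             for elem in row:
--                 temp += elem.split('/')[i]
--             rval += temp + '/'
--     return rval[:-1]
-- ===== SOURCE B (Python) =====
-- def sections_to_line(sections_arr):
--     slash_count = sections_arr[0][0].count('/') + 1
--     lines = []
--     for row in sections_arr:
--         buckets = [''] * slash_count
--         for elem in row: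
--             j = 0
--             for ch in elem:
--                 if ch == '/':
--                     j += 1
--                 elif j < slash_count:
--                     buckets[j] += ch
--         lines.extend(buckets)
--     return '/'.join(lines)
-- ===== Notes on version B (the rewrite author's own statement) =====
-- stated objective: alternative
-- what changed: B never calls split: a single character-level scan per element routes characters into per-line bucket accumulators selected by a running '/'-counter, and the buckets are collected into a line list joined once by '/', replacing A's per-index re-splitting of every element with string += accumulation and trailing-slash trimming.
import Mathlib
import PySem

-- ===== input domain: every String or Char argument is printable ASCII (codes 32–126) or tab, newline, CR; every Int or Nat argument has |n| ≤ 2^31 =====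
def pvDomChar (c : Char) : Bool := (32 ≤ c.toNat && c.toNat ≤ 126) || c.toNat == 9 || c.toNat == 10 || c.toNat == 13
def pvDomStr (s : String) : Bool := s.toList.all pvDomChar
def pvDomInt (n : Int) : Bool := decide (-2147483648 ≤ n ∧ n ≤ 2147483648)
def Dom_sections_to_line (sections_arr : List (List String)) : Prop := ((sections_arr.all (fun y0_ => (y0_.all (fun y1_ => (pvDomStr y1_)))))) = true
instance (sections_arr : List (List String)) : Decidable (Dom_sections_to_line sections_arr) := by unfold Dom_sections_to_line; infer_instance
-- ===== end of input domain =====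

-- B never calls split: one character-level scan per element routes characters into per-line
-- bucket accumulators (a running '/'-counter selects the bucket), the buckets are collected
-- into a line list joined once by '/' — replacing A's per-index re-splitting, string +=
-- accumulation and trailing-slash trimming (objective: alternative; same asymptotic cost).

-- ===== PORT A =====
-- elem.split('/') — '/' is nonempty so split? always returns some
def pvParts (e : String) : List String := (PySem.Str.split? e "/").getD []

def sections_to_line (sections_arr : List (List String)) : String :=
  match PySem.List.pyGet? sections_arr 0 with
  | none => ""                                     -- sections_arr[0]: IndexError, outside Pre_
  | some row0 =>
    match PySem.List.pyGet? row0 0 with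
    | none => ""                                   -- sections_arr[0][0]: IndexError, outside Pre_
    | some e0 =>
      let slash_count : Int := (PySem.Str.count e0 "/" : Int) + 1
      let rval : String := sections_arr.foldl (fun rval row =>
        (PySem.List.pyRange 0 slash_count 1).foldl (fun rval i =>
          let temp : String := row.foldl (fun temp elem =>
            -- elem.split('/')[i]: IndexError (none) is outside Pre_, mapped to ""
            temp ++ ((PySem.List.pyGet? (pvParts elem) i).getD "")) ""
          rval ++ temp ++ "/") rval) ""
      PySem.Str.slice rval none (some (-1))

-- ===== PORT B =====
-- the body of B's innermost loop ('for ch in elem'): state = (j, buckets); buckets are kept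
-- as List Char per the PySem string convention and turned into Strings when collected
def pvBump (slash_count : Nat) (st : Nat × List (List Char)) (ch : Char) : Nat × List (List Char) :=
  if ch = '/' then (st.1 + 1, st.2)
  else if st.1 < slash_count then (st.1, st.2.set st.1 (st.2.getD st.1 [] ++ [ch]))
  else st

def sections_to_line_alt (sections_arr : List (List String)) : String :=
  match PySem.List.pyGet? sections_arr 0 with
  | none => ""                                     -- sections_arr[0]: IndexError, outside Pre_
  | some row0 =>
    match PySem.List.pyGet? row0 0 with
    | none => ""                                   -- sections_arr[0][0]: IndexError, outside Pre_
    | some e0 =>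
      let slash_count : Nat := PySem.Str.count e0 "/" + 1
      let lines : List String := sections_arr.foldl (fun lines row =>
        let buckets : List (List Char) := List.replicate slash_count []    -- [''] * slash_count
        let buckets := row.foldl (fun bs elem =>
          (elem.toList.foldl (pvBump slash_count) (0, bs)).2) buckets
        lines ++ buckets.map String.ofList) []                             -- lines.extend(buckets)
      PySem.Str.join "/" lines

-- ===== PRECONDITION & SPEC =====
-- Pre_ is exactly where A returns: a nonempty first row of a nonempty list, and no element
-- with fewer '/' than the first element (otherwise elem.split('/')[i] raises IndexError).
def Pre_sections_to_line (sections_arr : List (List String)) : Prop :=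
  sections_arr ≠ [] ∧ sections_arr.headD [] ≠ [] ∧
    ∀ row ∈ sections_arr, ∀ e ∈ row,
      PySem.Str.count ((sections_arr.headD []).headD "") "/" ≤ PySem.Str.count e "/"
instance (sections_arr : List (List String)) : Decidable (Pre_sections_to_line sections_arr) := by
  unfold Pre_sections_to_line; infer_instance

def pvWitness_sections_to_line : List (List String) := [["a/b", "c/d"], ["e/f"]]

def Spec_sections_to_line (sections_arr : List (List String)) (out : String) : Prop := out = sections_to_line_alt sections_arr
instance (sections_arr : List (List String)) (out : String) : Decidable (Spec_sections_to_line sections_arr out) := by unfold Spec_sections_to_line; infer_instance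

-- ===== CLAIM (what is proved, stated in full; the proofs are below) =====
def Claim_equal_sections_to_line : Prop := ∀ (sections_arr : List (List String)), Dom_sections_to_line sections_arr → Pre_sections_to_line sections_arr → Spec_sections_to_line sections_arr (sections_to_line sections_arr)

-- ===== LEMMAS AND PROOFS =====

-- proof-side model of elem.split('/') over List Char
def mySplit : List Char → List (List Char)
  | [] => [[]]
  | c :: t =>
    if c = '/' then [] :: mySplit t
    else match mySplit t with
         | [] => [[c]]
         | p :: ps => (c :: p) :: ps

lemma mySplit_ne_nil : ∀ l, mySplit l ≠ [] := by
  intro l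
  cases l with
  | nil => simp [mySplit]
  | cons c t =>
    rw [mySplit]
    split
    · simp
    · split <;> simp

def prependAll (pre : List Char) (L : List (List Char)) : List (List Char) :=
  match L with
  | [] => [pre]
  | p :: ps => (pre ++ p) :: ps

lemma splitOn_go_eq : ∀ (fuel : Nat) (l cur : List Char) (acc : List (List Char)),
    l.length ≤ fuel →
      PySem.Chars.splitOn.go ['/'] fuel l cur acc
        = acc.reverse ++ prependAll cur.reverse (mySplit l) := by
  intro fuel
  induction fuel with
  | zero =>
    intro l cur acc h
    have : l = [] := List.eq_nil_of_length_eq_zero (by omega)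
    subst this
    simp [PySem.Chars.splitOn.go, prependAll, mySplit]
  | succ f ih =>
    intro l cur acc h
    cases l with
    | nil => simp [PySem.Chars.splitOn.go, prependAll, mySplit]
    | cons c t =>
      rw [PySem.Chars.splitOn.go]
      by_cases hc : c = '/'
      · rw [if_pos (by simp [hc])]
        subst hc
        rw [ih _ _ _ (by simpa using Nat.le_of_succ_le_succ (by simpa using h))]
        simp [mySplit]
        cases hms : mySplit t with
        | nil => exact absurd hms (mySplit_ne_nil t)
        | cons p ps => simp [prependAll]
      · rw [if_neg (by simp; exact fun h' => hc h'.symm)]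
        rw [ih _ _ _ (by simp at h; omega)]
        rw [mySplit]
        rw [if_neg hc]
        cases hms : mySplit t with
        | nil => exact absurd hms (mySplit_ne_nil t)
        | cons p ps => simp [prependAll]

lemma splitOn_slash (l : List Char) : PySem.Chars.splitOn l ['/'] = mySplit l := by
  rw [PySem.Chars.splitOn, splitOn_go_eq _ _ _ _ (by omega)]
  cases hms : mySplit l with
  | nil => exact absurd hms (mySplit_ne_nil l)
  | cons p ps => simp [prependAll]

lemma parts_getD (e : String) (i : Nat) :
    ((pvParts e).getD i "").toList = (mySplit e.toList).getD i [] := by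
  have hsplit : PySem.Str.split? e "/" = some ((PySem.Chars.splitOn e.toList ['/']).map String.ofList) := by
    simp [PySem.Str.split?, PySem.Chars.split?]
  rw [pvParts, hsplit, Option.getD_some, splitOn_slash]
  induction (mySplit e.toList) generalizing i with
  | nil => cases i <;> simp [List.getD]
  | cons p ps ih =>
    cases i with
    | zero => simp [List.getD]
    | succ k => simpa [List.getD] using ih k

-- the effect of one element scan on the buckets
def mergeAt (bs : List (List Char)) (j : Nat) (ms : List (List Char)) : List (List Char) :=
  bs.mapIdx (fun i b => if j ≤ i then b ++ ms.getD (i - j) [] else b)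

lemma length_mergeAt (bs : List (List Char)) (j : Nat) (ms : List (List Char)) :
    (mergeAt bs j ms).length = bs.length := by simp [mergeAt]

lemma mergeAt_empty_part (bs : List (List Char)) (j : Nat) : mergeAt bs j [[]] = bs := by
  unfold mergeAt
  apply List.ext_getElem (by simp)
  intro i h1 h2
  have h : ∀ k, ([[]] : List (List Char)).getD k ([] : List Char) = [] := by
    intro k; cases k <;> rfl
  simp [h]

lemma mergeAt_shift (bs : List (List Char)) (j : Nat) (ms : List (List Char)) :
    mergeAt bs (j + 1) ms = mergeAt bs j ([] :: ms) := by
  unfold mergeAt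
  apply List.ext_getElem (by simp)
  intro i h1 h2
  simp only [List.getElem_mapIdx]
  rcases Nat.lt_trichotomy i j with hij | hij | hij
  · rw [if_neg (by omega), if_neg (by omega)]
  · subst hij
    rw [if_neg (by omega), if_pos (by omega)]
    simp [List.getD]
  · rw [if_pos (by omega), if_pos (by omega)]
    have : i - j = (i - (j + 1)) + 1 := by omega
    rw [this]
    simp [List.getD]

lemma mergeAt_write (bs : List (List Char)) (j : Nat) (c : Char) (p : List Char)
    (ps : List (List Char)) (hj : j < bs.length) :
    mergeAt (bs.set j (bs.getD j [] ++ [c])) j (p :: ps) = mergeAt bs j ((c :: p) :: ps) := by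
  unfold mergeAt
  apply List.ext_getElem (by simp)
  intro i h1 h2
  simp only [List.getElem_mapIdx] at *
  by_cases hij : i = j
  · subst hij
    rw [if_pos (le_refl i), if_pos (le_refl i), List.getElem_set_self,
        List.getD_eq_getElem bs [] hj]
    simp [List.getD, List.append_assoc]
  · rw [List.getElem_set_ne (by omega)]
    by_cases hji : j ≤ i
    · rw [if_pos hji, if_pos hji]
      have hk : i - j = (i - j - 1) + 1 := by omega
      rw [hk]
      simp [List.getD]
    · rw [if_neg hji, if_neg hji]

lemma mergeAt_out (bs : List (List Char)) (j : Nat) (ms : List (List Char))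
    (hj : bs.length ≤ j) : mergeAt bs j ms = bs := by
  unfold mergeAt
  apply List.ext_getElem (by simp)
  intro i h1 h2
  simp only [List.getElem_mapIdx]
  rw [if_neg (by omega)]

lemma scan_eq (sc : Nat) : ∀ (l : List Char) (j : Nat) (bs : List (List Char)),
    bs.length = sc →
      l.foldl (pvBump sc) (j, bs) = (j + (mySplit l).length - 1, mergeAt bs j (mySplit l)) := by
  intro l
  induction l with
  | nil =>
    intro j bs _
    simp [mySplit, mergeAt_empty_part]
  | cons c t ih =>
    intro j bs hbs
    rw [List.foldl_cons]
    by_cases hc : c = '/'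
    · have hstep : pvBump sc (j, bs) c = (j + 1, bs) := by simp [pvBump, hc]
      rw [hstep, ih (j + 1) bs hbs, mySplit, if_pos hc, mergeAt_shift]
      have harith : j + 1 + (mySplit t).length - 1 = j + ([] :: mySplit t).length - 1 := by
        simp only [List.length_cons]; omega
      rw [harith]
    · cases hms : mySplit t with
      | nil => exact absurd hms (mySplit_ne_nil t)
      | cons p ps =>
        by_cases hj : j < sc
        · have hstep : pvBump sc (j, bs) c
              = (j, bs.set j (bs.getD j [] ++ [c])) := by simp [pvBump, hc, hj]
          rw [hstep, ih j _ (by simp [hbs]), hms,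
              mergeAt_write bs j c p ps (by omega), mySplit, if_neg hc, hms]
          simp
        · have hstep : pvBump sc (j, bs) c = (j, bs) := by simp [pvBump, hc, hj]
          rw [hstep, ih j bs hbs, hms,
              mergeAt_out bs j _ (by omega), mySplit, if_neg hc, hms,
              mergeAt_out bs j _ (by omega)]
          simp

lemma row_fold (sc : Nat) : ∀ (row : List String) (bs : List (List Char)),
    bs.length = sc →
      row.foldl (fun bs elem => (elem.toList.foldl (pvBump sc) (0, bs)).2) bs
        = bs.mapIdx (fun i b =>
            b ++ (row.map (fun e => (mySplit e.toList).getD i [])).flatten) := by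
  intro row
  induction row with
  | nil =>
    intro bs _
    simp only [List.foldl_nil, List.map_nil, List.flatten_nil, List.append_nil]
    apply List.ext_getElem (by simp)
    intro i h1 h2
    simp
  | cons e rest ih =>
    intro bs hbs
    rw [List.foldl_cons, scan_eq sc e.toList 0 bs hbs]
    rw [ih _ (by simp [length_mergeAt, hbs])]
    unfold mergeAt
    rw [List.mapIdx_mapIdx]
    apply List.ext_getElem (by simp)
    intro i h1 h2
    simp [List.getElem_mapIdx, List.append_assoc]

lemma replicate_mapIdx (sc : Nat) (g : Nat → List Char) :
    (List.replicate sc ([] : List Char)).mapIdx (fun i b => b ++ g i)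
      = (List.range sc).map g := by
  apply List.ext_getElem (by simp)
  intro i h1 h2
  simp

-- characters of line i of a row: the i-th split piece of each element, concatenated
def lineCs (row : List String) (i : Nat) : List Char :=
  (row.map (fun e => ((pvParts e).getD i "").toList)).flatten

-- the block of lines a row contributes (slash_count many)
def blockCs (sc : Nat) (row : List String) : List (List Char) :=
  (List.range sc).map (lineCs row)

lemma lineCs_eq (row : List String) (i : Nat) :
    lineCs row i = (row.map (fun e => (mySplit e.toList).getD i [])).flatten := by
  unfold lineCs
  congr 1
  exact List.map_congr_left (fun e _ => parts_getD e i)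

lemma str_foldl_append {α : Type} (g : α → String) :
    ∀ (l : List α) (s0 : String),
      (l.foldl (fun s x => s ++ g x) s0).toList
        = s0.toList ++ (l.map (fun x => (g x).toList)).flatten := by
  intro l
  induction l with
  | nil => intro s0; simp
  | cons a t ih =>
    intro s0
    simp only [List.foldl_cons, List.map_cons, List.flatten_cons]
    rw [ih, String.toList_append, List.append_assoc]

lemma temp_toList (row : List String) (k : Nat) :
    (row.foldl (fun t e => t ++ ((PySem.List.pyGet? (pvParts e) (k : Int)).getD "")) "").toList
      = lineCs row k := by
  rw [str_foldl_append]
  simp [lineCs, PySem.List.pyGet?_natCast, List.getD_eq_getElem?_getD]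

lemma level2_toList (row : List String) (sc : Nat) :
    ∀ (r : String),
      ((PySem.List.pyRange 0 (sc : Int) 1).foldl (fun rv i =>
          rv ++ (row.foldl (fun t e => t ++ ((PySem.List.pyGet? (pvParts e) i).getD "")) "") ++ "/") r).toList
        = r.toList ++ ((blockCs sc row).map (· ++ ['/'])).flatten := by
  have hgen : ∀ (ks : List Nat) (r : String),
      (ks.foldl (fun rv (k : Nat) =>
          rv ++ (row.foldl (fun t e => t ++ ((PySem.List.pyGet? (pvParts e) (k : Int)).getD "")) "") ++ "/") r).toList
        = r.toList ++ (ks.map (fun k => lineCs row k ++ ['/'])).flatten := by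
    intro ks
    induction ks with
    | nil => intro r; simp
    | cons k t ih =>
      intro r
      simp only [List.foldl_cons, List.map_cons, List.flatten_cons]
      rw [ih, String.toList_append, String.toList_append, temp_toList, List.append_assoc]
      simp [show ("/" : String).toList = ['/'] from rfl, List.append_assoc]
  intro r
  rw [PySem.List.pyRange_zero_nat, List.foldl_map, hgen]
  simp [blockCs, List.map_map, Function.comp_def]

lemma level1_toList (sc : Nat) :
    ∀ (arr : List (List String)) (r0 : String),
      (arr.foldl (fun rv row =>
          (PySem.List.pyRange 0 (sc : Int) 1).foldl (fun rv i =>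
            rv ++ (row.foldl (fun t e => t ++ ((PySem.List.pyGet? (pvParts e) i).getD "")) "") ++ "/") rv) r0).toList
        = r0.toList ++ (arr.map (fun row => ((blockCs sc row).map (· ++ ['/'])).flatten)).flatten := by
  intro arr
  induction arr with
  | nil => intro r0; simp
  | cons row rest ih =>
    intro r0
    simp only [List.foldl_cons, List.map_cons, List.flatten_cons]
    rw [ih, level2_toList, List.append_assoc]

lemma glue_dropLast : ∀ (L : List (List Char)), L ≠ [] →
    ((L.map (· ++ ['/'])).flatten).dropLast = PySem.Chars.join ['/'] L := by
  intro L
  induction L with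
  | nil => intro h; exact absurd rfl h
  | cons p rest ih =>
    intro _
    cases rest with
    | nil => simp [PySem.Chars.join_singleton]
    | cons q t =>
      rw [PySem.Chars.join_cons_cons, List.map_cons, List.flatten_cons,
          List.dropLast_append_of_ne_nil (by simp), ih (by simp)]

lemma flat_map_flatten (g : List Char → List Char) (F : List String → List (List Char)) :
    ∀ (arr : List (List String)),
      (arr.map (fun r => ((F r).map g).flatten)).flatten
        = (((arr.map F).flatten).map g).flatten := by
  intro arr
  induction arr with
  | nil => rfl
  | cons r rest ih => simp [ih]

-- ===== VERDICT (by name: the statements are the Claim_ definitions above) =====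
theorem sections_to_line_spec : Claim_equal_sections_to_line := by
  intro arr _ hpre
  unfold Spec_sections_to_line
  obtain ⟨hne, hh, -⟩ := hpre
  cases arr with
  | nil => exact absurd rfl hne
  | cons row0 rest =>
  cases row0 with
  | nil => simp at hh
  | cons e0 r0 =>
  have hget1 : PySem.List.pyGet? ((e0 :: r0) :: rest) (0 : Int) = some (e0 :: r0) := by
    simp
  have hget2 : PySem.List.pyGet? (e0 :: r0) (0 : Int) = some e0 := by
    simp
  rw [sections_to_line, sections_to_line_alt]
  simp only [hget1, hget2]
  set sc : Nat := PySem.Str.count e0 "/" + 1 with hsc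
  have hcast : ((PySem.Str.count e0 "/" : Nat) : Int) + 1 = ((sc : Nat) : Int) := by
    rw [hsc]; push_cast; ring
  apply String.toList_inj.mp
  -- A side: the concatenation with a '/' after every line, last one sliced off
  rw [PySem.Str.slice_to_neg_one, hcast, level1_toList sc]
  -- B side: the bucket lines of every row, joined by '/'
  have hrow : ∀ row : List String,
      (row.foldl (fun bs elem => (elem.toList.foldl (pvBump sc) (0, bs)).2)
          (List.replicate sc [])).map String.ofList
        = (blockCs sc row).map String.ofList := by
    intro row
    rw [row_fold sc row _ (by simp), replicate_mapIdx]
    simp only [List.nil_append, blockCs]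
    congr 1
    exact List.map_congr_left (fun i _ => (lineCs_eq row i).symm)
  conv_rhs =>
    rw [show (fun (lines : List String) (row : List String) =>
          lines ++ ((row.foldl (fun bs elem => (elem.toList.foldl (pvBump sc) (0, bs)).2)
            (List.replicate sc [])).map String.ofList))
        = (fun lines row => lines ++ (blockCs sc row).map String.ofList) from
      funext fun lines => funext fun row => by rw [hrow row]]
  rw [PySem.List.foldl_append_eq_flatMap, PySem.Str.toList_join]
  have hsl : (("/" : String).toList) = ['/'] := rfl
  rw [hsl]
  have hmap : (((e0 :: r0) :: rest).flatMap
        (fun row => (blockCs sc row).map String.ofList)).map String.toList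
      = (((e0 :: r0) :: rest).map (blockCs sc)).flatten := by
    simp [List.flatMap_def, List.map_flatten, List.map_map, Function.comp_def,
      String.toList_ofList]
  simp only [show ("" : String).toList = [] from rfl, List.nil_append, hmap]
  have hLne : ((((e0 :: r0) :: rest).map (blockCs sc)).flatten) ≠ [] := by
    have hb : blockCs sc (e0 :: r0) ≠ [] := by
      simp [blockCs, hsc, List.range_succ]
    simp only [List.map_cons, List.flatten_cons, ne_eq]
    intro hcon
    exact hb (List.append_eq_nil_iff.mp hcon).1
  rw [flat_map_flatten (· ++ ['/']) (blockCs sc), glue_dropLast _ hLne]
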